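-- pv_equiv track=rewrite | github.com/Dutkowska/Python | spoj/sys-systemy_pozycyjne.py | ele_sys
-- ===== SOURCE A (Python) =====
-- def ele_sys(eleven):
--     result=''
--     signs={0:'0',1:'1', 2:'2', 3:'3', 4:'4', 5:'5', 6:'6', 7:'7', 8:'8', 9:'9', 10:'A'}
--     if eleven==0: return '0'
--     while eleven!=0:
--         new=eleven%11
--         result+=signs[int(new)]
--         eleven=int(eleven/11)
--     result=result[::-1]
--     return result
-- ===== SOURCE B (Python) =====
-- def ele_sys(eleven):
--     if eleven == 0:
--         return '0'
--     signs = '0123456789A'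
--
--     def helper(n):
--         if n == 0:
--             return ''
--         # keep A's exact arithmetic: floor-mod digit, float-truncating division
--         return helper(int(n / 11)) + signs[int(n % 11)]
--
--     return helper(eleven)
-- ===== Notes on version B (the rewrite author's own statement) =====
-- stated objective: alternative
-- what changed: Replaces the iterative loop that appends digits least-significant-first into a string and reverses it at the end (with a dict digit map) by a recursive helper that builds the string most-significant-digit-first, so no reversal or accumulator is needed; digits come from indexing a literal string.
import Mathlib
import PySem

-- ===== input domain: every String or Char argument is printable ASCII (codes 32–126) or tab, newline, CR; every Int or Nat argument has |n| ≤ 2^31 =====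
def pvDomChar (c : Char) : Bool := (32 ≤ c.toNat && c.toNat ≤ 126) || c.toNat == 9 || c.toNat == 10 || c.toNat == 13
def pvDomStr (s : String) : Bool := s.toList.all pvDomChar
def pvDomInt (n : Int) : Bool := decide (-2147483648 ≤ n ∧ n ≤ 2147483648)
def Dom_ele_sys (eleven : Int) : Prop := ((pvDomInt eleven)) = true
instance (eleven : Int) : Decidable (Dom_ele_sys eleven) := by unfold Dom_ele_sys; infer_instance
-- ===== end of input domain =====

-- B replaces A's append-then-reverse loop (dict digit map) by a recursion that emits the
-- most significant digit first via string indexing; same arithmetic, same results, not faster.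

-- ===== PORT A =====
-- Python's `int(eleven/11)` (float division then truncation) equals truncating integer
-- division Int.tdiv exactly for |eleven| ≤ 2^31 (quotients are far from the nearest
-- integer relative to the float ulp), which is all of Dom_ele_sys.
def signsA : PySem.Dict Int Char :=
  PySem.Dict.ofList [(0,'0'),(1,'1'),(2,'2'),(3,'3'),(4,'4'),(5,'5'),
                     (6,'6'),(7,'7'),(8,'8'),(9,'9'),(10,'A')]

-- the `while eleven!=0` loop; `result` accumulated as a list of code points.
-- signs[int(new)] always hits (0 ≤ new < 11), so the KeyError default is never used.
def ele_sys_loop (eleven : Int) (result : List Char) : List Char :=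
  if eleven = 0 then result
  else
    ele_sys_loop (Int.tdiv eleven 11)
      (result ++ [(signsA.get? (PySem.Int.mod eleven 11)).getD ' '])
termination_by eleven.natAbs
decreasing_by
  rw [Int.natAbs_tdiv]
  exact Nat.div_lt_self (by omega) (by norm_num)

def ele_sys (eleven : Int) : String :=
  if eleven = 0 then "0"
  else
    -- result = result[::-1] (PySem.List.slice?_none_none_neg_one: [::-1] is reverse)
    String.ofList ((ele_sys_loop eleven []).reverse)

-- ===== PORT B =====
-- signs[int(n % 11)] as indexing into the literal string '0123456789A'; always in range.
def signsB (i : Int) : Char :=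
  (PySem.List.pyGet? "0123456789A".toList i).getD ' '

def ele_sys_helper (n : Int) : List Char :=
  if n = 0 then []
  else ele_sys_helper (Int.tdiv n 11) ++ [signsB (PySem.Int.mod n 11)]
termination_by n.natAbs
decreasing_by
  rw [Int.natAbs_tdiv]
  exact Nat.div_lt_self (by omega) (by norm_num)

def ele_sys_alt (eleven : Int) : String :=
  if eleven = 0 then "0"
  else String.ofList (ele_sys_helper eleven)

-- ===== PRECONDITION & SPEC =====
def Spec_ele_sys (eleven : Int) (out : String) : Prop := out = ele_sys_alt eleven
instance (eleven : Int) (out : String) : Decidable (Spec_ele_sys eleven out) := by unfold Spec_ele_sys; infer_instance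

-- ===== CLAIM (what is proved, stated in full; the proofs are below) =====
def Claim_equal_ele_sys : Prop := ∀ (eleven : Int), Dom_ele_sys eleven → Spec_ele_sys eleven (ele_sys eleven)

-- ===== LEMMAS AND PROOFS =====

-- the two digit maps agree on the mod-11 residues
lemma digit_eq (n : Int) :
    (signsA.get? (PySem.Int.mod n 11)).getD ' ' = signsB (PySem.Int.mod n 11) := by
  have h0 : 0 ≤ PySem.Int.mod n 11 := PySem.Int.mod_nonneg _ (by norm_num)
  have h1 : PySem.Int.mod n 11 < 11 := PySem.Int.mod_lt _ (by norm_num)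
  set k := PySem.Int.mod n 11 with hk
  interval_cases k <;> decide

-- A's loop produces the reverse of B's most-significant-first digit list, after `result`
lemma loop_eq_rev (m : Nat) : ∀ (n : Int), n.natAbs ≤ m → ∀ (acc : List Char),
    ele_sys_loop n acc = acc ++ (ele_sys_helper n).reverse := by
  induction m with
  | zero =>
    intro n h acc
    have hn : n = 0 := by omega
    subst hn
    simp [ele_sys_loop, ele_sys_helper]
  | succ m ih =>
    intro n h acc
    by_cases h0 : n = 0
    · subst h0; simp [ele_sys_loop, ele_sys_helper]
    · rw [ele_sys_loop, ele_sys_helper, if_neg h0, if_neg h0]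
      have hlt : (Int.tdiv n 11).natAbs ≤ m := by
        have : (Int.tdiv n 11).natAbs < n.natAbs := by
          rw [Int.natAbs_tdiv]
          exact Nat.div_lt_self (by omega) (by norm_num)
        omega
      rw [ih _ hlt, digit_eq]
      simp

-- ===== VERDICT (by name: the statement is the Claim_ definition above) =====
theorem ele_sys_spec : Claim_equal_ele_sys := by
  intro eleven _
  unfold Spec_ele_sys ele_sys ele_sys_alt
  by_cases h : eleven = 0
  · simp [h]
  · rw [if_neg h, if_neg h, loop_eq_rev eleven.natAbs eleven le_rfl []]
    simp
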